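-- pv_equiv track=rewrite | github.com/yunseoLee0343/vllm | benchmarks/benchmark_mamba_selective_scan_stepwise.py | build_step_chunks
-- ===== SOURCE A (Python) =====
-- def build_step_chunks(start: int, n_tokens: int, block_size: int) -> list[int]:
--     """Return per-chunk token counts respecting block boundaries."""
--     if n_tokens <= 0:
--         return []
--     chunks: list[int] = []
--     pos = start
--     remaining = n_tokens
--     while remaining > 0:
--         boundary = ((pos // block_size) + 1) * block_size
--         take = min(boundary - pos, remaining)
--         chunks.append(take)
--         pos += take
--         remaining -= take
--     return chunks
-- ===== SOURCE B (Python) =====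
-- def build_step_chunks(start: int, n_tokens: int, block_size: int) -> list[int]:
--     """Return per-chunk token counts respecting block boundaries (closed form)."""
--     if n_tokens <= 0:
--         return []
--     first = min(block_size - start % block_size, n_tokens)
--     rem = n_tokens - first
--     q, r = divmod(rem, block_size)
--     return [first] + [block_size] * q + ([r] if r else [])
-- ===== Notes on version B (the rewrite author's own statement) =====
-- stated objective: simpler
-- what changed: Replaced the per-chunk boundary loop by a closed form: one aligned first chunk via start % block_size, then divmod of the remainder gives the full blocks and the final partial.
import Mathlib
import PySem

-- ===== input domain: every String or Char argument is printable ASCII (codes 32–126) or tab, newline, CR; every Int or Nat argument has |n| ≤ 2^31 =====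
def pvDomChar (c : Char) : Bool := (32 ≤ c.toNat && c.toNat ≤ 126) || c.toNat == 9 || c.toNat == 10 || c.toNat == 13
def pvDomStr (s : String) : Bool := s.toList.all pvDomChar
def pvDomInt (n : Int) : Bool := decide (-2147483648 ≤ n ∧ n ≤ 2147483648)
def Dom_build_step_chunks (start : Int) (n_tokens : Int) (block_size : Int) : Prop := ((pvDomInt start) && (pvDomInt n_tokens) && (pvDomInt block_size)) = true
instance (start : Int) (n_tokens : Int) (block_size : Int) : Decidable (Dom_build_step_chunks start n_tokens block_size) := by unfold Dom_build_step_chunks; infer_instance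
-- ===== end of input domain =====

-- B replaces A's per-chunk boundary loop by a closed form (aligned first chunk, then divmod); objective: simpler.

-- ===== PORT A =====
-- A's while loop; fuel n_tokens.toNat suffices on Pre_ (block_size > 0 makes every take ≥ 1).
def pvLoopA (block_size : Int) : Nat → Int → Int → List Int → List Int
  | 0, _, _, chunks => chunks.reverse
  | fuel+1, pos, remaining, chunks =>
    if remaining > 0 then
      let boundary := (PySem.Int.floordiv pos block_size + 1) * block_size
      let take := min (boundary - pos) remaining
      pvLoopA block_size fuel (pos + take) (remaining - take) (take :: chunks)
    else chunks.reverse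

def build_step_chunks (start : Int) (n_tokens : Int) (block_size : Int) : List Int :=
  if n_tokens ≤ 0 then []
  else pvLoopA block_size n_tokens.toNat start n_tokens []

-- ===== PORT B =====
def build_step_chunks_alt (start : Int) (n_tokens : Int) (block_size : Int) : List Int :=
  if n_tokens ≤ 0 then []
  else
    let first := min (block_size - PySem.Int.mod start block_size) n_tokens
    let rem := n_tokens - first
    let q := PySem.Int.floordiv rem block_size
    let r := PySem.Int.mod rem block_size
    [first] ++ List.replicate q.toNat block_size ++ (if r ≠ 0 then [r] else [])

-- ===== PRECONDITION & SPEC =====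
-- When n_tokens > 0, Python A raises ZeroDivisionError for block_size = 0 and loops forever
-- for block_size < 0 (take becomes nonpositive); for n_tokens ≤ 0 A returns [] for any block_size.
def Pre_build_step_chunks (start : Int) (n_tokens : Int) (block_size : Int) : Prop :=
  0 < n_tokens → 0 < block_size
instance (start : Int) (n_tokens : Int) (block_size : Int) : Decidable (Pre_build_step_chunks start n_tokens block_size) := by unfold Pre_build_step_chunks; infer_instance

def pvWitness_build_step_chunks : Int × Int × Int := (5, 7, 3)

def Spec_build_step_chunks (start : Int) (n_tokens : Int) (block_size : Int) (out : List Int) : Prop := out = build_step_chunks_alt start n_tokens block_size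
instance (start : Int) (n_tokens : Int) (block_size : Int) (out : List Int) : Decidable (Spec_build_step_chunks start n_tokens block_size out) := by unfold Spec_build_step_chunks; infer_instance

-- ===== CLAIM (what is proved, stated in full; the proofs are below) =====
def Claim_equal_build_step_chunks : Prop := ∀ (start : Int) (n_tokens : Int) (block_size : Int), Dom_build_step_chunks start n_tokens block_size → Pre_build_step_chunks start n_tokens block_size → Spec_build_step_chunks start n_tokens block_size (build_step_chunks start n_tokens block_size)

-- ===== LEMMAS AND PROOFS =====

theorem pvLoopA_zero (bs : Int) (f : Nat) (p : Int) (acc : List Int) :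
    pvLoopA bs f p 0 acc = acc.reverse := by
  cases f <;> simp [pvLoopA]

theorem pvLoopA_aligned (bs : Int) (hbs : 0 < bs) :
    ∀ (fuel : Nat) (pos m : Int) (acc : List Int),
      0 ≤ m → m ≤ (fuel : Int) → pos % bs = 0 →
      pvLoopA bs fuel pos m acc =
        acc.reverse ++ List.replicate (m / bs).toNat bs ++
          (if m % bs ≠ 0 then [m % bs] else []) := by
  intro fuel
  induction fuel with
  | zero =>
    intro pos m acc h0 h1 _
    have hm : m = 0 := by exact_mod_cast le_antisymm h1 h0
    subst hm
    simp [pvLoopA]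
  | succ f ih =>
    intro pos m acc h0 h1 hal
    by_cases hm : m > 0
    · simp only [pvLoopA, if_pos hm, PySem.Int.floordiv_eq_ediv_of_pos hbs]
      have hstep : (pos / bs + 1) * bs - pos = bs := by
        have h := Int.ediv_add_emod pos bs
        linear_combination h - hal
      rw [hstep]
      by_cases hle : bs ≤ m
      · -- full block
        have hmin : min bs m = bs := min_eq_left hle
        rw [hmin]
        have hal' : (pos + bs) % bs = 0 := by
          have : pos + bs = pos + bs * 1 := by ring
          rw [this, Int.add_mul_emod_self_left, hal]
        have hdiv : m / bs = (m - bs) / bs + 1 := by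
          have := Int.add_mul_ediv_right (m - bs) 1 (ne_of_gt hbs)
          simp only [one_mul] at this
          rw [← this]; ring_nf
        have hmod : m % bs = (m - bs) % bs := (Int.sub_emod_right m bs).symm
        rw [ih (pos + bs) (m - bs) (bs :: acc) (by omega)
              (by push_cast at h1 ⊢; omega) hal']
        have hq0 : 0 ≤ (m - bs) / bs := Int.ediv_nonneg (by omega) hbs.le
        have htn : (m / bs).toNat = ((m - bs) / bs).toNat + 1 := by
          rw [hdiv]; omega
        rw [htn, hmod]
        simp [List.replicate_succ]
      · -- final partial block
        have hmin : min bs m = m := min_eq_right (le_of_not_ge hle)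
        rw [hmin]
        have : m - m = 0 := by ring
        rw [this, pvLoopA_zero]
        have hdiv : m / bs = 0 := Int.ediv_eq_zero_of_lt h0 (by omega)
        have hmod : m % bs = m := Int.emod_eq_of_lt h0 (by omega)
        rw [hdiv, hmod]
        simp [if_pos (by omega : m ≠ 0)]
    · have hm0 : m = 0 := by omega
      subst hm0
      simp [pvLoopA]

theorem build_step_chunks_spec : Claim_equal_build_step_chunks := by
  intro start n bs _ hpre
  unfold Spec_build_step_chunks build_step_chunks build_step_chunks_alt
  by_cases hn : n ≤ 0
  · simp [hn]
  · have hn' : 0 < n := by omega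
    have hbs : 0 < bs := hpre hn'
    simp only [if_neg hn, PySem.Int.mod_eq_emod_of_pos hbs,
      PySem.Int.floordiv_eq_ediv_of_pos hbs]
    obtain ⟨f, hf⟩ : ∃ f, n.toNat = f + 1 := ⟨n.toNat - 1, by omega⟩
    rw [hf]
    simp only [pvLoopA, if_pos hn', PySem.Int.floordiv_eq_ediv_of_pos hbs]
    have hm0 : 0 ≤ start % bs ∧ start % bs < bs :=
      ⟨Int.emod_nonneg start (ne_of_gt hbs), Int.emod_lt_of_pos start hbs⟩
    have hstep : (start / bs + 1) * bs - start = bs - start % bs := by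
      have h := Int.ediv_add_emod start bs
      linear_combination h
    rw [hstep]
    by_cases hle : n ≤ bs - start % bs
    · -- single chunk: first = n
      have hmin : min (bs - start % bs) n = n := min_eq_right hle
      rw [hmin]
      have : n - n = 0 := by ring
      rw [this, pvLoopA_zero]
      norm_num
    · -- first = bs - start % bs, then aligned tail
      have hmin : min (bs - start % bs) n = bs - start % bs :=
        min_eq_left (le_of_not_ge hle)
      rw [hmin]
      have hal : (start + (bs - start % bs)) % bs = 0 := by
        have heq : start + (bs - start % bs) = bs * (start / bs + 1) := by
          have h := Int.ediv_add_emod start bs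
          linear_combination -h
        rw [heq]
        exact Int.mul_emod_right bs _
      rw [pvLoopA_aligned bs hbs f (start + (bs - start % bs))
            (n - (bs - start % bs)) [bs - start % bs]
            (by omega) (by omega) hal]
      simp
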